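-- pv_equiv track=rewrite | github.com/janikstucki/The-Ship | subraum_tychon_scanner.py | is_candidate
-- ===== SOURCE A (Python) =====
-- def is_candidate(bug_times, line_times):
--     if len(bug_times) != len(line_times):
--         return False
--     smaller_found = False
--     for b, l in zip(bug_times, line_times):
--         if l < b:
--             smaller_found = True
--         elif l > b:
--             return False
--     return smaller_found
-- ===== SOURCE B (Python) =====
-- def is_candidate(bug_times, line_times):
--     if len(bug_times) != len(line_times):
--         return False
--     pairs = list(zip(bug_times, line_times))
--     return all(l <= b for b, l in pairs) and any(l < b for b, l in pairs)
-- ===== Notes on version B (the rewrite author's own statement) =====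
-- stated objective: simpler
-- what changed: Replaces the fused single loop with an accumulator flag and early return by two independent short-circuiting quantifier passes (all/any) over the zipped pairs.
import Mathlib
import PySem

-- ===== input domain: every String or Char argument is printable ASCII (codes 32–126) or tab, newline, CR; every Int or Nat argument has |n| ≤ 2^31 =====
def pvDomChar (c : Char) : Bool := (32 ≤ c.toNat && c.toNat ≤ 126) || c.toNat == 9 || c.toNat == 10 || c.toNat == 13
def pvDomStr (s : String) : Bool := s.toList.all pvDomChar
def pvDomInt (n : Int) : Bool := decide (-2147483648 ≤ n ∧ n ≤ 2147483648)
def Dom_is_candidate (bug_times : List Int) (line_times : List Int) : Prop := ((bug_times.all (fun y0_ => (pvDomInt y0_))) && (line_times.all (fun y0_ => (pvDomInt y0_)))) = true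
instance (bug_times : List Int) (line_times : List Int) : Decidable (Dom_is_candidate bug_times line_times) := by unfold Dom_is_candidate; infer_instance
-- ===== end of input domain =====

-- B replaces A's fused loop with a flag and early return by two independent all/any passes over the zipped pairs (objective: simpler).

-- ===== PORT A =====
-- the for-loop over zip with the 'smaller_found' flag and early 'return False'
def isCandLoop (pairs : List (Int × Int)) (smaller_found : Bool) : Bool :=
  match pairs with
  | [] => smaller_found
  | (b, l) :: rest =>
      if l < b then isCandLoop rest true
      else if l > b then false
      else isCandLoop rest smaller_found

def is_candidate (bug_times : List Int) (line_times : List Int) : Bool :=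
  if bug_times.length ≠ line_times.length then false
  else isCandLoop (bug_times.zip line_times) false

-- ===== PORT B =====
def is_candidate_alt (bug_times : List Int) (line_times : List Int) : Bool :=
  if bug_times.length ≠ line_times.length then false
  else
    let pairs := bug_times.zip line_times
    (pairs.all (fun p => p.2 ≤ p.1)) && (pairs.any (fun p => p.2 < p.1))

-- ===== PRECONDITION & SPEC =====
def Spec_is_candidate (bug_times : List Int) (line_times : List Int) (out : Bool) : Prop := out = is_candidate_alt bug_times line_times
instance (bug_times : List Int) (line_times : List Int) (out : Bool) : Decidable (Spec_is_candidate bug_times line_times out) := by unfold Spec_is_candidate; infer_instance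

-- ===== CLAIM (what is proved, stated in full; the proofs are below) =====
def Claim_equal_is_candidate : Prop := ∀ (bug_times : List Int) (line_times : List Int), Dom_is_candidate bug_times line_times → Spec_is_candidate bug_times line_times (is_candidate bug_times line_times)

-- ===== LEMMAS AND PROOFS =====
theorem isCandLoop_eq (pairs : List (Int × Int)) (f : Bool) :
    isCandLoop pairs f =
      ((pairs.all (fun p => p.2 ≤ p.1)) && (f || pairs.any (fun p => p.2 < p.1))) := by
  induction pairs generalizing f with
  | nil => simp [isCandLoop]
  | cons hd tl ih =>
      obtain ⟨b, l⟩ := hd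
      simp only [isCandLoop, List.all_cons, List.any_cons]
      by_cases h1 : l < b
      · simp [h1, ih, le_of_lt h1]
      · by_cases h2 : l > b
        · simp [h1, h2, not_le.mpr h2]
        · have : l ≤ b := le_of_not_gt h2
          simp [h1, h2, ih, this]

-- ===== VERDICT (by name: the statement is the Claim_ definition above) =====
theorem is_candidate_spec : Claim_equal_is_candidate := by
  intro bt lt _
  unfold Spec_is_candidate is_candidate is_candidate_alt
  split
  · rfl
  · simp [isCandLoop_eq]
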